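-- pv_equiv track=rewrite | github.com/Awais68/Digital_Employee | orchestrator.py | generate_linkedin_hook
-- ===== SOURCE A (Python) =====
-- def generate_linkedin_hook(content: str, topic: str) -> str:
--     """Generate an attention-grabbing hook (first 150 characters)."""
--     content_lower = content.lower()
--
--     # Detect content type and generate appropriate hook
--     if any(word in content_lower for word in ["announce", "launch", "release", "new"]):
--         hooks = [
--             f"🚀 Excited to share what we've been building...",
--             f"Big news! We're launching something special...",
--             f"After months of development, it's finally here...",
--         ]
--     elif any(word in content_lower for word in ["learn", "insight", "thought", "opinion"]):
--         hooks = [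
--             f"Unpopular opinion about AI development...",
--             f"Here's what most people miss about building AI agents...",
--             f"💡 Hot take: The future of SaaS isn't what you think...",
--         ]
--     elif any(word in content_lower for word in ["how", "tutorial", "guide", "tips"]):
--         hooks = [
--             f"Here's how to build AI agents in 2026...",
--             f"🎯 5 lessons learned from shipping AI features...",
--             f"Want to integrate AI into your SaaS? Start here...",
--         ]
--     elif any(word in content_lower for word in ["daily", "update", "progress"]):
--         hooks = [
--             f"📈 Daily build update: Here's what we shipped today...",
--             f"Building in public: Day X of our AI journey...",
--             f"Today's win: Solved a problem that saved us 10+ hours...",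
--         ]
--     else:
--         hooks = [
--             f"🤖 The intersection of AI agents and SaaS is exploding...",
--             f"Here's why AI agents are changing how we build software...",
--             f"💼 What we're learning about AI + SaaS development...",
--         ]
--
--     return hooks[0]  # Return first hook (could be randomized)
-- ===== SOURCE B (Python) =====
-- # Flat keyword -> priority map; return the hook of the minimum-priority matching
-- # keyword (no group-by-group cascade: every keyword is tested once, priorities decide).
-- _KEYWORD_PRIORITY = {
--     "announce": 0, "launch": 0, "release": 0, "new": 0,
--     "learn": 1, "insight": 1, "thought": 1, "opinion": 1,
--     "how": 2, "tutorial": 2, "guide": 2, "tips": 2,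
--     "daily": 3, "update": 3, "progress": 3,
-- }
-- _HOOKS = [
--     "\U0001F680 Excited to share what we've been building...",
--     "Unpopular opinion about AI development...",
--     "Here's how to build AI agents in 2026...",
--     "\U0001F4C8 Daily build update: Here's what we shipped today...",
--     "\U0001F916 The intersection of AI agents and SaaS is exploding...",
-- ]
--
--
-- def generate_linkedin_hook(content: str, topic: str) -> str:
--     """Hook = _HOOKS[min priority of any keyword found in the content]."""
--     content_lower = content.lower()
--     best = min((p for kw, p in _KEYWORD_PRIORITY.items() if kw in content_lower),
--                default=len(_HOOKS) - 1)
--     return _HOOKS[best]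
-- ===== Notes on version B (the rewrite author's own statement) =====
-- stated objective: alternative
-- what changed: Replaced the ordered if/elif cascade over keyword groups by a flat keyword->priority map: B takes the minimum priority among all matching keywords and indexes a hook array, instead of returning at the first matching group.
import Mathlib
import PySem

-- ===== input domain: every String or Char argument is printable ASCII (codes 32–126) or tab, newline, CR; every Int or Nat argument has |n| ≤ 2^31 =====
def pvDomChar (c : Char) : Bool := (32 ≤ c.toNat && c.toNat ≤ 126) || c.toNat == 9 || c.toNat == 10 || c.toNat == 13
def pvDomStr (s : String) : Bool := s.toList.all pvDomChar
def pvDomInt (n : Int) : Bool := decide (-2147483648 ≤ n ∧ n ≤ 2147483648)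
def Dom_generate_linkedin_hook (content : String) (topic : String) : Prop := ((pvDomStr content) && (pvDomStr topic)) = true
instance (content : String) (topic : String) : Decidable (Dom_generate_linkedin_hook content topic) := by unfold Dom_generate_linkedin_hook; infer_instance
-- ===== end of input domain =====

-- B replaces A's ordered if/elif cascade by a flat keyword→priority map: it takes the
-- MINIMUM priority among all matching keywords and indexes a hook array (objective: alternative).

-- ===== PORT A =====
def generate_linkedin_hook (content : String) (topic : String) : String :=
  let content_lower := PySem.Str.lower content
  let hooks :=
    if ["announce", "launch", "release", "new"].any (fun word => PySem.Str.isIn word content_lower) then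
      ["🚀 Excited to share what we've been building...",
       "Big news! We're launching something special...",
       "After months of development, it's finally here..."]
    else if ["learn", "insight", "thought", "opinion"].any (fun word => PySem.Str.isIn word content_lower) then
      ["Unpopular opinion about AI development...",
       "Here's what most people miss about building AI agents...",
       "💡 Hot take: The future of SaaS isn't what you think..."]
    else if ["how", "tutorial", "guide", "tips"].any (fun word => PySem.Str.isIn word content_lower) then
      ["Here's how to build AI agents in 2026...",
       "🎯 5 lessons learned from shipping AI features...",
       "Want to integrate AI into your SaaS? Start here..."]
    else if ["daily", "update", "progress"].any (fun word => PySem.Str.isIn word content_lower) then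
      ["📈 Daily build update: Here's what we shipped today...",
       "Building in public: Day X of our AI journey...",
       "Today's win: Solved a problem that saved us 10+ hours..."]
    else
      ["🤖 The intersection of AI agents and SaaS is exploding...",
       "Here's why AI agents are changing how we build software...",
       "💼 What we're learning about AI + SaaS development..."]
  (PySem.List.pyGet? hooks 0).getD ""   -- hooks[0]; hooks is always non-empty, so never none

-- ===== PORT B =====
-- the Python dict _KEYWORD_PRIORITY, in insertion order
def pvKeywordPrio : List (String × Nat) :=
  [("announce", 0), ("launch", 0), ("release", 0), ("new", 0),
   ("learn", 1), ("insight", 1), ("thought", 1), ("opinion", 1),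
   ("how", 2), ("tutorial", 2), ("guide", 2), ("tips", 2),
   ("daily", 3), ("update", 3), ("progress", 3)]

def pvHooks : List String :=
  ["🚀 Excited to share what we've been building...",
   "Unpopular opinion about AI development...",
   "Here's how to build AI agents in 2026...",
   "📈 Daily build update: Here's what we shipped today...",
   "🤖 The intersection of AI agents and SaaS is exploding..."]

def generate_linkedin_hook_alt (content : String) (topic : String) : String :=
  let content_lower := PySem.Str.lower content
  -- min(... , default=len(_HOOKS)-1) as a fold over the filtered priorities
  let best := pvKeywordPrio.foldl
    (fun acc e => if PySem.Str.isIn e.1 content_lower then min acc e.2 else acc)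
    (pvHooks.length - 1)
  (PySem.List.pyGet? pvHooks (best : Int)).getD ""   -- _HOOKS[best]; best < len(_HOOKS)

-- ===== PRECONDITION & SPEC =====
def Spec_generate_linkedin_hook (content : String) (topic : String) (out : String) : Prop := out = generate_linkedin_hook_alt content topic
instance (content : String) (topic : String) (out : String) : Decidable (Spec_generate_linkedin_hook content topic out) := by unfold Spec_generate_linkedin_hook; infer_instance

-- ===== CLAIM =====
def Claim_equal_generate_linkedin_hook : Prop := ∀ (content : String) (topic : String), Dom_generate_linkedin_hook content topic → Spec_generate_linkedin_hook content topic (generate_linkedin_hook content topic)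

-- ===== LEMMAS AND PROOFS =====

-- folding min over one keyword group (all priorities p) = min with p iff any keyword matches
theorem pvFoldGroup (cl : String) (p : Nat) (ws : List String) (b : Nat) :
    (ws.map (fun w => (w, p))).foldl
      (fun acc e => if PySem.Str.isIn e.1 cl then min acc e.2 else acc) b
    = if ws.any (fun w => PySem.Str.isIn w cl) then min b p else b := by
  induction ws generalizing b with
  | nil => simp
  | cons w ws ih =>
    rw [List.map_cons, List.foldl_cons, List.any_cons]
    by_cases h : PySem.Str.isIn w cl = true
    · rw [if_pos h, ih, h, Bool.true_or, if_pos rfl]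
      split <;> omega
    · rw [if_neg h, ih, Bool.not_eq_true] at *
      rw [h, Bool.false_or]

-- ===== VERDICT =====
theorem generate_linkedin_hook_spec : Claim_equal_generate_linkedin_hook := by
  intro content topic _
  unfold Spec_generate_linkedin_hook generate_linkedin_hook generate_linkedin_hook_alt
  set cl := PySem.Str.lower content with hcl
  have htab : pvKeywordPrio =
      (["announce", "launch", "release", "new"].map (fun w => (w, 0)))
      ++ (["learn", "insight", "thought", "opinion"].map (fun w => (w, 1)))
      ++ (["how", "tutorial", "guide", "tips"].map (fun w => (w, 2)))
      ++ (["daily", "update", "progress"].map (fun w => (w, 3))) := by rfl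
  rw [htab]
  simp only [List.foldl_append, pvFoldGroup]
  by_cases h1 : ["announce", "launch", "release", "new"].any (fun w => PySem.Str.isIn w cl) <;>
  by_cases h2 : ["learn", "insight", "thought", "opinion"].any (fun w => PySem.Str.isIn w cl) <;>
  by_cases h3 : ["how", "tutorial", "guide", "tips"].any (fun w => PySem.Str.isIn w cl) <;>
  by_cases h4 : ["daily", "update", "progress"].any (fun w => PySem.Str.isIn w cl) <;>
    (simp only [Bool.not_eq_true] at *; simp only [h1, h2, h3, h4]; rfl)
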